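-- pv_equiv track=rewrite | github.com/ncedenog/ind_assignment_16_nov | ex2_assignment_16_11.py | checkout_2
-- ===== SOURCE A (Python) =====
-- product_list = {
--         "Guitar": 1000,
--         "Pick box": 5,
--         "Guitar string": 10,
--         "Insurance": 5,
--         "Priority mail": 10
--         }
--
-- def checkout_2(shopping_cart):
--
--     final_price = 0
--
--     indexes_insurance = [i for i, x in enumerate(shopping_cart) if x == "Insurance"]
--
--
--
--     indexes_priority = [b for b, y in enumerate(shopping_cart) if y == "Priority mail"]
--
--     if len(indexes_insurance) > 0:
--         final_price += (product_list["Insurance"])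
--
--
--
--     if len(indexes_priority) > 0:
--         final_price += (product_list["Priority mail"])
--
--
--
--     if shopping_cart == []:
--         return None
--
--     else:
--
--         for item in shopping_cart:
--             if item == "Insurance":
--                 continue
--
--             elif item == "Priority mail":
--                 continue
--
--             else:
--                 final_price += (product_list[item])
--
--
--     return final_price
-- ===== SOURCE B (Python) =====
-- product_list = {
--         "Guitar": 1000,
--         "Pick box": 5,
--         "Guitar string": 10,
--         "Insurance": 5,
--         "Priority mail": 10
--         }
--
-- def checkout_2(shopping_cart):
--     # Frequency-table strategy: build a counts dict once, then sum over DISTINCT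
--     # keys, multiplying price by multiplicity (specials counted once).
--     if shopping_cart == []:
--         return None
--     counts = {}
--     for item in shopping_cart:
--         counts[item] = counts.get(item, 0) + 1
--     total = 0
--     for item, n in counts.items():
--         if item in ("Insurance", "Priority mail"):
--             total += product_list[item]
--         else:
--             total += product_list[item] * n
--     return total
-- ===== Notes on version B (the rewrite author's own statement) =====
-- stated objective: alternative
-- what changed: B builds a frequency table (counts dict) and sums over DISTINCT keys, multiplying each price by its multiplicity and adding the two special prices once per distinct key, instead of A's per-element summing loop with enumerate index-list membership passes.
import Mathlib
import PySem

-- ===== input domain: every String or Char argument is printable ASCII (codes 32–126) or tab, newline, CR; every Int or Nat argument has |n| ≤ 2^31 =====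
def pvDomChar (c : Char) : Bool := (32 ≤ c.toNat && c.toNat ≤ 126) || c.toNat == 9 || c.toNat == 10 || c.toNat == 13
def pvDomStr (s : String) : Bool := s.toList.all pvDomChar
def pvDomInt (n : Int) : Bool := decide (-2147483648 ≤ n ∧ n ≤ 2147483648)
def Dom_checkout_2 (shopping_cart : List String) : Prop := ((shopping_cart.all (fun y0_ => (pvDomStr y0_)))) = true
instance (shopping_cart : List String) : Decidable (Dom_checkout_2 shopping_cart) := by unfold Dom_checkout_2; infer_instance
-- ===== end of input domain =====

-- B sums over a frequency table of DISTINCT keys (price × count, specials once) instead of A's per-element loop with enumerate passes (objective: alternative; same asymptotic cost).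

-- the module-level dict product_list, shared by both programs
def pvProductList : PySem.Dict String Int :=
  ⟨[("Guitar", 1000), ("Pick box", 5), ("Guitar string", 10), ("Insurance", 5), ("Priority mail", 10)]⟩

-- ===== PORT A =====
-- product_list[item] raises KeyError for unknown items; those inputs are excluded by Pre_,
-- so the port uses getD (the default 0 is never read inside Pre_).
def pvStepA (fp : Int) (item : String) : Int :=
  if item == "Insurance" then fp
  else if item == "Priority mail" then fp
  else fp + pvProductList.getD item 0

def checkout_2 (shopping_cart : List String) : Option Int :=
  let final_price : Int := 0
  let indexes_insurance := (PySem.List.enumerate shopping_cart).filter (fun p => p.2 == "Insurance")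
  let indexes_priority := (PySem.List.enumerate shopping_cart).filter (fun p => p.2 == "Priority mail")
  let final_price := if indexes_insurance.length > 0 then final_price + pvProductList.getD "Insurance" 0 else final_price
  let final_price := if indexes_priority.length > 0 then final_price + pvProductList.getD "Priority mail" 0 else final_price
  if shopping_cart == [] then none
  else
    some (shopping_cart.foldl pvStepA final_price)

-- ===== PORT B =====
-- the body of B's loop over counts.items()
def pvStepB (acc : Int) (p : String × Int) : Int :=
  if p.1 == "Insurance" || p.1 == "Priority mail" then acc + pvProductList.getD p.1 0
  else acc + pvProductList.getD p.1 0 * p.2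

def checkout_2_alt (shopping_cart : List String) : Option Int :=
  if shopping_cart == [] then none
  else
    -- counts[item] = counts.get(item, 0) + 1
    let counts := shopping_cart.foldl (fun d x => d.insert x (d.getD x 0 + 1)) PySem.Dict.empty
    some (counts.items.foldl pvStepB 0)

-- ===== PRECONDITION & SPEC =====
-- Pre_ excludes carts containing an item that is not a key of product_list: there both
-- programs raise KeyError (A in its summing loop, B in its loop over the counts table).
def Pre_checkout_2 (shopping_cart : List String) : Prop :=
  (shopping_cart.all (fun item =>
    item == "Guitar" || item == "Pick box" || item == "Guitar string" ||
    item == "Insurance" || item == "Priority mail")) = true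
instance (shopping_cart : List String) : Decidable (Pre_checkout_2 shopping_cart) := by unfold Pre_checkout_2; infer_instance
def pvWitness_checkout_2 : List String := ["Guitar", "Insurance", "Pick box", "Insurance"]
def Spec_checkout_2 (shopping_cart : List String) (out : Option Int) : Prop := out = checkout_2_alt shopping_cart
instance (shopping_cart : List String) (out : Option Int) : Decidable (Spec_checkout_2 shopping_cart out) := by unfold Spec_checkout_2; infer_instance

-- ===== CLAIM (what is proved, stated in full; the proofs are below) =====
def Claim_equal_checkout_2 : Prop := ∀ (shopping_cart : List String), Dom_checkout_2 shopping_cart → Pre_checkout_2 shopping_cart → Spec_checkout_2 shopping_cart (checkout_2 shopping_cart)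

-- ===== LEMMAS AND PROOFS =====

-- the special-key bonus each distinct key contributes in B's table pass
def pvH (k : String) : Int :=
  if k == "Insurance" then 5 else if k == "Priority mail" then 10 else 0

-- price of an ordinary item, 0 on the two specials (what A's loop adds per element)
def pvFA (k : String) : Int :=
  if k == "Insurance" then 0 else if k == "Priority mail" then 0 else pvProductList.getD k 0

theorem pvFoldA_eq (l : List String) (a : Int) :
    l.foldl pvStepA a = a + (l.map pvFA).sum := by
  induction l generalizing a with
  | nil => simp
  | cons x xs ih =>
    simp only [List.foldl_cons, List.map_cons, List.sum_cons, ih]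
    unfold pvStepA pvFA
    split_ifs <;> ring

theorem pvFoldB_eq (l : List (String × Int)) (a : Int) :
    l.foldl pvStepB a = a + (l.map (fun p => pvStepB 0 p)).sum := by
  induction l generalizing a with
  | nil => simp
  | cons x xs ih =>
    simp only [List.foldl_cons, List.map_cons, List.sum_cons, ih]
    unfold pvStepB
    split_ifs <;> ring

theorem pvFilter_enum_pos (l : List String) (t : String) (s : Int) :
    0 < ((PySem.List.enumerate l s).filter (fun p => p.2 == t)).length ↔ l.contains t := by
  induction l generalizing s with
  | nil => simp [PySem.List.enumerate_nil]
  | cons x xs ih =>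
    rw [PySem.List.enumerate_cons]
    by_cases h : x = t
    · subst h; simp
    · simp [h, ih, Ne.symm h]

-- ===== VERDICT (by name: the statement is the Claim_ definition above) =====
theorem checkout_2_spec : Claim_equal_checkout_2 := by
  unfold Claim_equal_checkout_2
  intro cart _ _
  unfold Spec_checkout_2 checkout_2 checkout_2_alt
  by_cases hnil : cart == []
  · simp [hnil]
  · simp only [hnil, Bool.false_eq_true, if_false]
    rw [PySem.Dict.foldl_insert_getD_add_one_eq_counter, pvFoldB_eq, pvFoldA_eq]
    rw [PySem.Dict.items_counter, List.map_map]
    have h5 : pvProductList.getD "Insurance" 0 = 5 := by decide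
    have h10 : pvProductList.getD "Priority mail" 0 = 10 := by decide
    have hS : (PySem.Set.ofList cart).toFinset = cart.toFinset := by
      ext x; simp [PySem.Set.mem_ofList]
    have hpt : ∀ k : String,
        (fun p => pvStepB 0 p) ((fun k => (k, (cart.count k : Int))) k)
          = (cart.count k : Int) * pvFA k + pvH k := by
      intro k
      by_cases hI : k = "Insurance"
      · subst hI; simp [pvStepB, pvFA, pvH, h5]
      · by_cases hP : k = "Priority mail"
        · subst hP; simp [pvStepB, pvFA, pvH, h10]
        · have hc : (k == "Insurance" || k == "Priority mail") = false := by simp [hI, hP]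
          simp only [pvStepB, pvFA, pvH, beq_iff_eq, hI, hP, if_false, hc, Bool.false_eq_true]
          ring
    have hB : (List.map ((fun p => pvStepB 0 p) ∘ fun k => (k, (cart.count k : Int)))
          (PySem.Set.ofList cart)).sum
        = ∑ k ∈ cart.toFinset, ((cart.count k : Int) * pvFA k + pvH k) := by
      rw [← List.sum_toFinset _ (PySem.Set.nodup_ofList cart), hS]
      exact Finset.sum_congr rfl (fun k _ => hpt k)
    have hA : (cart.map pvFA).sum = ∑ k ∈ cart.toFinset, (cart.count k : Int) * pvFA k := by
      rw [Finset.sum_list_map_count]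
      exact Finset.sum_congr rfl (fun k _ => by push_cast [nsmul_eq_mul]; ring)
    have hH : ∑ k ∈ cart.toFinset, pvH k
        = (if "Insurance" ∈ cart.toFinset then (5:Int) else 0)
          + (if "Priority mail" ∈ cart.toFinset then (10:Int) else 0) := by
      have : ∀ k ∈ cart.toFinset, pvH k
          = (if k = "Insurance" then (5:Int) else 0) + (if k = "Priority mail" then (10:Int) else 0) := by
        intro k _
        unfold pvH
        by_cases hI : k = "Insurance"
        · subst hI; simp
        · by_cases hP : k = "Priority mail" <;> simp [hI, hP]
      rw [Finset.sum_congr rfl this, Finset.sum_add_distrib,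
          Finset.sum_ite_eq' cart.toFinset "Insurance" (fun _ => (5:Int)),
          Finset.sum_ite_eq' cart.toFinset "Priority mail" (fun _ => (10:Int))]
    rw [hB, hA, Finset.sum_add_distrib, hH]
    have eI := pvFilter_enum_pos cart "Insurance" 0
    have eP := pvFilter_enum_pos cart "Priority mail" 0
    rw [h5, h10]
    simp only [gt_iff_lt, eI, eP, List.contains_iff_mem, ← List.mem_toFinset, Option.some.injEq]
    split_ifs <;> ring
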